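-- pv_equiv track=rewrite | github.com/paldy/some_exercises | max_ind_in_str.py | max_ind
-- ===== SOURCE A (Python) =====
-- def max_ind(line: str, sx: str, sy: str) -> int:
-- 	l = []
-- 	for z in sx, sy:
-- 		l += [a for a in range(len(line)) if line[a] == z]
-- 	try:
-- 		return sorted(l)[-1]
-- 	except IndexError:
-- 		return -1
-- ===== SOURCE B (Python) =====
-- def max_ind(line: str, sx: str, sy: str) -> int:
--     for i in range(len(line) - 1, -1, -1):
--         c = line[i]
--         if c == sx or c == sy:
--             return i
--     return -1
-- ===== Notes on version B (the rewrite author's own statement) =====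
-- stated objective: faster
-- what changed: Replaces build-two-index-lists-concatenate-sort-take-last with a single reverse linear scan that returns the first (i.e. highest) matching index.
import Mathlib
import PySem

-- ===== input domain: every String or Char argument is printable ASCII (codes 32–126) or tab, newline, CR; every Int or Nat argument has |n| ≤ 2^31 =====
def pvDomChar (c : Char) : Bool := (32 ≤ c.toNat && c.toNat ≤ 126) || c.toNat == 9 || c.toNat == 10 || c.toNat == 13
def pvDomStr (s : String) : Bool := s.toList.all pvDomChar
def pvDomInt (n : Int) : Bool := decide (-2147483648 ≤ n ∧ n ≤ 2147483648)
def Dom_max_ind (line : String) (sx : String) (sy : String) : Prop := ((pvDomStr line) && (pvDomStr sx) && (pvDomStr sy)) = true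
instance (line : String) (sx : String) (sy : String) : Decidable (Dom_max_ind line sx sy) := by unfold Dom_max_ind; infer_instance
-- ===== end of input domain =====

-- B is a single reverse linear scan instead of A's build-filter-lists/concatenate/sort/take-last; return value only.

-- ===== PORT A =====
-- line[a] == z : the one-char string at index a compared with the string z
-- a comes from range(len(line)), so the index is always valid
def pvMatchA (cs : List Char) (z : List Char) (a : Int) : Bool :=
  decide ([cs.getD a.toNat ' '] = z)

def max_ind (line : String) (sx : String) (sy : String) : Int :=
  let cs := line.toList
  -- l = []; for z in sx, sy: l += [a for a in range(len(line)) if line[a] == z]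
  let l : List Int := [sx.toList, sy.toList].foldl
    (fun l z => l ++ (PySem.List.pyRange 0 (cs.length : Int) 1).filter (pvMatchA cs z)) []
  -- try: return sorted(l)[-1] except IndexError: return -1
  match PySem.List.pyGet? (PySem.List.sorted l (fun x => x) false) (-1) with
  | some v => v
  | none => -1

-- ===== PORT B =====
-- c == sx or c == sy, for the char at (valid) index k
def pvMatchB (cs : List Char) (sx : List Char) (sy : List Char) (k : Nat) : Bool :=
  decide ([cs.getD k ' '] = sx) || decide ([cs.getD k ' '] = sy)

-- for i in range(len(line)-1, -1, -1): if match: return i; return -1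
def pvScan (cs : List Char) (sx : List Char) (sy : List Char) : Nat → Int
  | 0 => -1
  | k + 1 => if pvMatchB cs sx sy k then (k : Int) else pvScan cs sx sy k

def max_ind_alt (line : String) (sx : String) (sy : String) : Int :=
  pvScan line.toList sx.toList sy.toList line.toList.length

-- ===== PRECONDITION & SPEC =====
def Spec_max_ind (line : String) (sx : String) (sy : String) (out : Int) : Prop := out = max_ind_alt line sx sy
instance (line : String) (sx : String) (sy : String) (out : Int) : Decidable (Spec_max_ind line sx sy out) := by unfold Spec_max_ind; infer_instance

-- ===== CLAIM (what is proved, stated in full; the proofs are below) =====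
def Claim_equal_max_ind : Prop := ∀ (line : String) (sx : String) (sy : String), Dom_max_ind line sx sy → Spec_max_ind line sx sy (max_ind line sx sy)

-- ===== LEMMAS AND PROOFS =====

-- B's scan finds no index when no index below n matches
lemma pvScan_none (cs sx sy : List Char) (n : Nat)
    (h : ∀ k < n, pvMatchB cs sx sy k = false) : pvScan cs sx sy n = -1 := by
  induction n with
  | zero => rfl
  | succ k ih =>
    simp only [pvScan, h k (Nat.lt_succ_self k), if_false, Bool.false_eq_true]
    exact ih (fun j hj => h j (Nat.lt_succ_of_lt hj))

-- B's scan returns the greatest matching index below n, if any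
lemma pvScan_max (cs sx sy : List Char) (n : Nat) (m : Nat) (hm : m < n)
    (hQ : pvMatchB cs sx sy m = true) :
    ∃ j : Nat, pvScan cs sx sy n = (j : Int) ∧ j < n ∧ pvMatchB cs sx sy j = true ∧
      ∀ k < n, pvMatchB cs sx sy k = true → k ≤ j := by
  induction n with
  | zero => omega
  | succ k ih =>
    by_cases hk : pvMatchB cs sx sy k = true
    · exact ⟨k, by simp [pvScan, hk], Nat.lt_succ_self k, hk, fun j hj _ => Nat.lt_succ_iff.mp hj⟩
    · have hm' : m < k := by
        rcases Nat.lt_succ_iff_lt_or_eq.mp hm with h | h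
        · exact h
        · exact absurd (h ▸ hQ) hk
      obtain ⟨j, h1, h2, h3, h4⟩ := ih hm'
      refine ⟨j, ?_, Nat.lt_succ_of_lt h2, h3, ?_⟩
      · simp [pvScan, hk, h1]
      · intro p hp hQp
        rcases Nat.lt_succ_iff_lt_or_eq.mp hp with h | h
        · exact h4 p h hQp
        · exact absurd (h ▸ hQp) hk
    
-- in a ≤-pairwise list every element is ≤ the last
lemma pairwise_le_getLast : ∀ (l : List Int) (h : l ≠ []),
    l.Pairwise (fun a b => a ≤ b) → ∀ x ∈ l, x ≤ l.getLast h
  | [a], _, _, x, hx => by simp_all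
  | a :: b :: t, _, hp, x, hx => by
    rw [List.getLast_cons (by simp)]
    rcases List.mem_cons.mp hx with rfl | hx'
    · exact List.rel_of_pairwise_cons hp (List.getLast_mem _)
    · exact pairwise_le_getLast (b :: t) (by simp) hp.of_cons x hx'

-- sorted(l)[-1] is a maximum element of a nonempty l
lemma sorted_last_max (l : List Int) (hl : l ≠ []) :
    ∃ m, PySem.List.pyGet? (PySem.List.sorted l (fun x => x) false) (-1) = some m ∧
      m ∈ l ∧ ∀ x ∈ l, x ≤ m := by
  have hperm := PySem.List.sorted_perm l (fun x => x) false
  have hne : PySem.List.sorted l (fun x => x) false ≠ [] := by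
    intro h; exact hl (List.Perm.eq_nil (h ▸ hperm).symm)
  refine ⟨(PySem.List.sorted l (fun x => x) false).getLast hne, ?_, ?_, ?_⟩
  · rw [PySem.List.pyGet?_neg_one, List.getLast?_eq_some_getLast hne]
  · exact (PySem.List.mem_sorted _ _ _ _).mp (List.getLast_mem hne)
  · intro x hx
    have hx' : x ∈ PySem.List.sorted l (fun x => x) false := (PySem.List.mem_sorted _ _ _ _).mpr hx
    exact pairwise_le_getLast _ hne (PySem.List.sorted_pairwise l (fun x => x)) x hx'

-- A's combined list has exactly the matching indices (as casts of Nats below n)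
lemma memL (cs sx sy : List Char) (x : Int) :
    x ∈ ((PySem.List.pyRange 0 (cs.length : Int) 1).filter (pvMatchA cs sx) ++
         (PySem.List.pyRange 0 (cs.length : Int) 1).filter (pvMatchA cs sy)) ↔
    ∃ k : Nat, x = (k : Int) ∧ k < cs.length ∧ pvMatchB cs sx sy k = true := by
  constructor
  · intro hx
    rcases List.mem_append.mp hx with h | h <;>
    · obtain ⟨hr, hf⟩ := List.mem_filter.mp h
      rw [PySem.List.mem_pyRange_one] at hr
      refine ⟨x.toNat, by omega, by omega, ?_⟩
      simp only [pvMatchB, pvMatchA] at hf ⊢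
      simp at hf ⊢
      simp [hf]
  · rintro ⟨k, rfl, hk, hQ⟩
    simp only [pvMatchB] at hQ
    rcases Bool.or_eq_true_iff.mp hQ with h | h
    · refine List.mem_append.mpr (Or.inl (List.mem_filter.mpr ⟨?_, ?_⟩))
      · rw [PySem.List.mem_pyRange_one]; omega
      · simp [pvMatchA]; simpa using h
    · refine List.mem_append.mpr (Or.inr (List.mem_filter.mpr ⟨?_, ?_⟩))
      · rw [PySem.List.mem_pyRange_one]; omega
      · simp [pvMatchA]; simpa using h

-- ===== VERDICT (by name: the statement is the Claim_ definition above) =====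
theorem max_ind_spec : Claim_equal_max_ind := by
  intro line sx sy _
  unfold Spec_max_ind max_ind max_ind_alt
  simp only [List.foldl, List.nil_append]
  set cs := line.toList with hcs
  set L : List Int := ((PySem.List.pyRange 0 (cs.length : Int) 1).filter (pvMatchA cs sx.toList) ++
         (PySem.List.pyRange 0 (cs.length : Int) 1).filter (pvMatchA cs sy.toList)) with hL
  by_cases hE : ∃ k : Nat, k < cs.length ∧ pvMatchB cs sx.toList sy.toList k = true
  · obtain ⟨m, hm, hQ⟩ := hE
    have hLne : L ≠ [] := by
      intro h
      have : (m : Int) ∈ L := (memL cs sx.toList sy.toList (m : Int)).mpr ⟨m, rfl, hm, hQ⟩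
      simp [h] at this
    obtain ⟨v, hv, hvmem, hvmax⟩ := sorted_last_max L hLne
    obtain ⟨j, hj1, hj2, hj3, hj4⟩ := pvScan_max cs sx.toList sy.toList cs.length m hm hQ
    rw [hv, hj1]
    obtain ⟨k, rfl, hk, hQk⟩ := (memL cs sx.toList sy.toList v).mp hvmem
    have h1 : k ≤ j := hj4 k hk hQk
    have h2 : (j : Int) ≤ (k : Int) :=
      hvmax (j : Int) ((memL cs sx.toList sy.toList (j : Int)).mpr ⟨j, rfl, hj2, hj3⟩)
    show ((k : Nat) : Int) = (j : Int)
    omega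
  · push Not at hE
    have hLnil : L = [] := by
      rcases h : L with _ | ⟨x, t⟩
      · rfl
      · exfalso
        have : x ∈ L := by rw [h]; exact List.mem_cons_self
        obtain ⟨k, rfl, hk, hQ⟩ := (memL cs sx.toList sy.toList x).mp this
        exact absurd hQ (by simp [hE k hk])
    rw [hLnil]
    rw [pvScan_none cs sx.toList sy.toList cs.length (fun k hk => by simp [hE k hk])]
    rfl
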